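-- pv_equiv track=rewrite | github.com/pypi-data/pypi-mirror-274 | packages/std.algorithm/std.algorithm-1.2.9.tar.gz/std.algorithm-1.2.9/std/regexp/__init__.py | recursive_construct
-- ===== SOURCE A (Python) =====
-- def need_escape(s):
--     return s in "()[]{}"
--
-- def recursive_construct(parentheses, depth):
--     mid = len(parentheses) // 2
--     start = parentheses[0:mid]
--     end = parentheses[mid:]
--
--     if need_escape(start):
--         start = "\\" + start
--         end = "\\" + end
--
--     not_parentheses = '\\[\\]' if parentheses == '[]' else parentheses
--     if depth == 1:
--         return f"{start}[^{not_parentheses}]*{end}";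
--
--     return f"{start}[^{not_parentheses}]*(?:" + recursive_construct(parentheses, depth - 1) + f"[^{not_parentheses}]*)*{end}"
-- ===== SOURCE B (Python) =====
-- def recursive_construct(parentheses, depth):
--     mid = len(parentheses) // 2
--     start = parentheses[0:mid]
--     end = parentheses[mid:]
--
--     if start in "()[]{}":
--         start = "\\" + start
--         end = "\\" + end
--
--     not_parentheses = '\\[\\]' if parentheses == '[]' else parentheses
--     result = f"{start}[^{not_parentheses}]*{end}"
--     for _ in range(2, depth + 1):
--         result = f"{start}[^{not_parentheses}]*(?:" + result + f"[^{not_parentheses}]*)*{end}"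
--     return result
-- ===== Notes on version B (the rewrite author's own statement) =====
-- stated objective: alternative
-- what changed: Replaces A's outside-in self-recursion with an explicit bottom-up loop: the depth-1 base pattern is built once and then re-wrapped depth-1 times, accumulating the layers inside-out.
import Mathlib
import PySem

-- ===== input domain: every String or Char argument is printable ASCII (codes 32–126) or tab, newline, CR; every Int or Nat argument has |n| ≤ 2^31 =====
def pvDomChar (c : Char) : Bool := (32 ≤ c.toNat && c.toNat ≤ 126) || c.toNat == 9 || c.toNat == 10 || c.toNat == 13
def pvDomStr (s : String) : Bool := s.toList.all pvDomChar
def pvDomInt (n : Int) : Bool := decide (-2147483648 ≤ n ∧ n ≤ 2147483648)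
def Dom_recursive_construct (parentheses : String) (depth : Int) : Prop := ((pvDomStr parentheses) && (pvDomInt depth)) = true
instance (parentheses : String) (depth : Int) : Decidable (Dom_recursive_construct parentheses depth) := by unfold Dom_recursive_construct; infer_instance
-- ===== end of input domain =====

-- B replaces A's outside-in self-recursion with a bottom-up loop that re-wraps the depth-1 base pattern; same result for depth ≥ 1.


-- ===== PORT A =====
-- need_escape(s) = s in "()[]{}"  (Python substring membership)
def needEscape (s : String) : Bool := PySem.Str.isIn s "()[]{}"

-- A's self-recursion, fuel = depth - 1 (Python recurses until depth == 1; depth ≤ 0 raises RecursionError, excluded by Pre_)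
def recAuxA (start np end_ : String) : Nat → String
  | 0 => start ++ "[^" ++ np ++ "]*" ++ end_
  | n + 1 => start ++ "[^" ++ np ++ "]*(?:" ++ recAuxA start np end_ n ++ "[^" ++ np ++ "]*)*" ++ end_

def recursive_construct (parentheses : String) (depth : Int) : String :=
  let mid := PySem.Int.floordiv (PySem.Str.len parentheses) 2
  let start0 := PySem.Str.slice parentheses (some 0) (some mid)
  let end0 := PySem.Str.slice parentheses (some mid) none
  let start := if needEscape start0 then "\\" ++ start0 else start0
  let end_ := if needEscape start0 then "\\" ++ end0 else end0
  let np := if parentheses == "[]" then "\\[\\]" else parentheses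
  recAuxA start np end_ (depth - 1).toNat

-- ===== PORT B =====
def recursive_construct_alt (parentheses : String) (depth : Int) : String :=
  let mid := PySem.Int.floordiv (PySem.Str.len parentheses) 2
  let start0 := PySem.Str.slice parentheses (some 0) (some mid)
  let end0 := PySem.Str.slice parentheses (some mid) none
  let start := if PySem.Str.isIn start0 "()[]{}" then "\\" ++ start0 else start0
  let end_ := if PySem.Str.isIn start0 "()[]{}" then "\\" ++ end0 else end0
  let np := if parentheses == "[]" then "\\[\\]" else parentheses
  let base := start ++ "[^" ++ np ++ "]*" ++ end_
  (PySem.List.pyRange 2 (depth + 1) 1).foldl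
    (fun result _ => start ++ "[^" ++ np ++ "]*(?:" ++ result ++ "[^" ++ np ++ "]*)*" ++ end_) base

-- ===== PRECONDITION & SPEC =====
-- Python A recurses with no base case for depth ≤ 0 and raises RecursionError there; Pre_ admits exactly depth ≥ 1.
def Pre_recursive_construct (parentheses : String) (depth : Int) : Prop := 1 ≤ depth
instance (parentheses : String) (depth : Int) : Decidable (Pre_recursive_construct parentheses depth) := by unfold Pre_recursive_construct; infer_instance
def pvWitness_recursive_construct : String × Int := ("()", 3)

def Spec_recursive_construct (parentheses : String) (depth : Int) (out : String) : Prop := out = recursive_construct_alt parentheses depth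
instance (parentheses : String) (depth : Int) (out : String) : Decidable (Spec_recursive_construct parentheses depth out) := by unfold Spec_recursive_construct; infer_instance

-- ===== CLAIM (what is proved, stated in full; the proofs are below) =====
def Claim_equal_recursive_construct : Prop := ∀ (parentheses : String) (depth : Int), Dom_recursive_construct parentheses depth → Pre_recursive_construct parentheses depth → Spec_recursive_construct parentheses depth (recursive_construct parentheses depth)

-- ===== LEMMAS AND PROOFS =====

-- a fold with a body that ignores the element iterates its body length-many times
theorem foldl_const_iterate {α : Type} (g : String → String) :
    ∀ (l : List α) (b : String), l.foldl (fun acc _ => g acc) b = g^[l.length] b := by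
  intro l
  induction l with
  | nil => intro b; rfl
  | cons x xs ih =>
      intro b
      simp only [List.foldl_cons, List.length_cons, ih, Function.iterate_succ_apply]

-- A's recursion is the same wrapping iterated n times on the base pattern
theorem recAuxA_eq_iterate (start np end_ : String) :
    ∀ n : Nat, recAuxA start np end_ n =
      (fun result => start ++ "[^" ++ np ++ "]*(?:" ++ result ++ "[^" ++ np ++ "]*)*" ++ end_)^[n]
        (start ++ "[^" ++ np ++ "]*" ++ end_) := by
  intro n
  induction n with
  | zero => rfl
  | succ n ih => simp only [recAuxA, ih, Function.iterate_succ_apply']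

theorem ports_agree (parentheses : String) (depth : Int) :
    recursive_construct parentheses depth = recursive_construct_alt parentheses depth := by
  unfold recursive_construct recursive_construct_alt
  rw [foldl_const_iterate, PySem.List.length_pyRange_one, recAuxA_eq_iterate]
  have h : (depth - 1).toNat = (depth + 1 - 2).toNat := by omega
  simp only [needEscape, h]
  rfl

-- ===== VERDICT (by name: the statement is the Claim_ definition above) =====
theorem recursive_construct_spec : Claim_equal_recursive_construct := by
  intro p d _ _
  exact ports_agree p d
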